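-- pv_equiv track=rewrite | github.com/kostyabushuev/university-labs | Sam6_2.py | remove_element_from_tuple
-- ===== SOURCE A (Python) =====
-- def remove_element_from_tuple(value):
--     source_tuple, element = value
--
--     new_list = []
--     was_removed = False
--     for x in list(source_tuple):
--         if x == element and was_removed == False:
--             was_removed = True
--             continue
--         new_list.append(x)
--
--     return tuple(new_list)
-- ===== SOURCE B (Python) =====
-- def remove_element_from_tuple(value):
--     source_tuple, element = value
--     t = tuple(source_tuple)
--     try:
--         i = t.index(element)
--     except ValueError:
--         return t
--     return t[:i] + t[i+1:]
-- ===== Notes on version B (the rewrite author's own statement) =====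
-- stated objective: idiomatic
-- what changed: Replaces the manual loop-with-flag accumulation by locating the first occurrence with tuple.index and slicing around it (try/except handles the absent case).
import Mathlib
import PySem

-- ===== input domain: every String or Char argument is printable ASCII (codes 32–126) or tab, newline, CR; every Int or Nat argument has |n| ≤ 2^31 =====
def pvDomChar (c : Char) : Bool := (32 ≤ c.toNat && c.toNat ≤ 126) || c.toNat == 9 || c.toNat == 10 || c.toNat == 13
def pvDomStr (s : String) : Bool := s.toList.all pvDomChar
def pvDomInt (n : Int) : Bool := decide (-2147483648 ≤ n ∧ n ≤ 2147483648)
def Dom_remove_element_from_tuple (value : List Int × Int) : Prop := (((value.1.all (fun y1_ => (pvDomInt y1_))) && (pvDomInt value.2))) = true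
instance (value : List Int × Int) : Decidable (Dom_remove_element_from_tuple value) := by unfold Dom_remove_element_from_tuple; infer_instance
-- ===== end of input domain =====

-- B removes the first occurrence by locating it with tuple.index and slicing around it (idiomatic); A's loop-with-flag behaviour is reproduced exactly.

-- ===== PORT A =====
def remove_element_from_tuple (value : List Int × Int) : List Int :=
  let element := value.2
  let st := value.1.foldl (fun (st : List Int × Bool) x =>
    if x = element ∧ st.2 = false then (st.1, true) else (st.1 ++ [x], st.2))
    ([], false)
  st.1

-- ===== PORT B =====
def remove_element_from_tuple_alt (value : List Int × Int) : List Int :=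
  let t := value.1
  match PySem.List.index? t value.2 with
  | none => t
  | some i => PySem.List.slice t none (some (i : Int)) ++ PySem.List.slice t (some ((i : Int) + 1)) none

-- ===== PRECONDITION & SPEC =====
def Spec_remove_element_from_tuple (value : List Int × Int) (out : List Int) : Prop := out = remove_element_from_tuple_alt value
instance (value : List Int × Int) (out : List Int) : Decidable (Spec_remove_element_from_tuple value out) := by unfold Spec_remove_element_from_tuple; infer_instance

-- ===== CLAIM (what is proved, stated in full; the proofs are below) =====
def Claim_equal_remove_element_from_tuple : Prop := ∀ (value : List Int × Int), Dom_remove_element_from_tuple value → Spec_remove_element_from_tuple value (remove_element_from_tuple value)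

-- ===== LEMMAS AND PROOFS =====

-- A's loop once the flag is set: it just appends everything.
theorem pvFoldTrue (e : Int) (l acc : List Int) :
    l.foldl (fun (st : List Int × Bool) x =>
      if x = e ∧ st.2 = false then (st.1, true) else (st.1 ++ [x], st.2)) (acc, true)
    = (acc ++ l, true) := by
  induction l generalizing acc with
  | nil => simp
  | cons x xs ih => simp [ih]

-- A's loop with the flag unset on a list avoiding e: appends everything, flag stays unset.
theorem pvFoldAbsent (e : Int) (l acc : List Int) (h : e ∉ l) :
    l.foldl (fun (st : List Int × Bool) x =>
      if x = e ∧ st.2 = false then (st.1, true) else (st.1 ++ [x], st.2)) (acc, false)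
    = (acc ++ l, false) := by
  induction l generalizing acc with
  | nil => simp
  | cons x xs ih =>
    simp only [List.mem_cons, not_or] at h
    simp [List.foldl_cons, Ne.symm h.1, ih _ h.2, List.append_assoc]

-- A's loop on pre ++ e :: suf with e ∉ pre: drops that single e.
theorem pvFoldSplit (e : Int) (pre suf acc : List Int) (h : e ∉ pre) :
    (pre ++ e :: suf).foldl (fun (st : List Int × Bool) x =>
      if x = e ∧ st.2 = false then (st.1, true) else (st.1 ++ [x], st.2)) (acc, false)
    = (acc ++ pre ++ suf, true) := by
  rw [List.foldl_append, pvFoldAbsent e pre acc h]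
  simp [pvFoldTrue]

-- ===== VERDICT (by name: the statement is the Claim_ definition above) =====
theorem remove_element_from_tuple_spec : Claim_equal_remove_element_from_tuple := by
  intro value _
  obtain ⟨t, e⟩ := value
  unfold Spec_remove_element_from_tuple remove_element_from_tuple remove_element_from_tuple_alt
  simp only
  cases hidx : PySem.List.index? t e with
  | none =>
    have he : e ∉ t := (PySem.List.index?_eq_none_iff t e).mp hidx
    simp [pvFoldAbsent e t [] he]
  | some i =>
    obtain ⟨pre, suf, hts, hlen, hpre⟩ := (PySem.List.index?_eq_some_iff t e i).mp hidx
    subst hts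
    rw [pvFoldSplit e pre suf [] hpre]
    have h1 : ((i : Int) + 1) = ((i + 1 : Nat) : Int) := by push_cast; ring
    simp only [h1, PySem.List.slice_to_natCast, PySem.List.slice_from_natCast]
    simp [← hlen, List.drop_append]
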